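-- pv_equiv track=rewrite | github.com/noabauma/bachelor_thesis | adhesion_plot.py | eps
-- ===== SOURCE A (Python) =====
-- def eps(file_name):
--     n = len(file_name)
--     count = 0
--     idx_beg = 0
--     idx_end = 0
--     for i in range(n):
--         if file_name[i] == '/' and count == 0:
--             idx_beg = i+1
--             count += 1
--         elif file_name[i] == '/' and count == 1:
--             idx_end = i
--             break
--     return file_name[idx_beg:idx_end]
-- ===== SOURCE B (Python) =====
-- def eps(file_name):
--     parts = file_name.split('/', 2)
--     return parts[1] if len(parts) == 3 else ''
-- ===== Notes on version B (the rewrite author's own statement) =====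
-- stated objective: simpler
-- what changed: Replaces the manual index-tracking character scan (counter, break, slicing) by a single maxsplit-2 split on the slash separator, returning the middle piece exactly when two slashes exist.
import Mathlib
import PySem

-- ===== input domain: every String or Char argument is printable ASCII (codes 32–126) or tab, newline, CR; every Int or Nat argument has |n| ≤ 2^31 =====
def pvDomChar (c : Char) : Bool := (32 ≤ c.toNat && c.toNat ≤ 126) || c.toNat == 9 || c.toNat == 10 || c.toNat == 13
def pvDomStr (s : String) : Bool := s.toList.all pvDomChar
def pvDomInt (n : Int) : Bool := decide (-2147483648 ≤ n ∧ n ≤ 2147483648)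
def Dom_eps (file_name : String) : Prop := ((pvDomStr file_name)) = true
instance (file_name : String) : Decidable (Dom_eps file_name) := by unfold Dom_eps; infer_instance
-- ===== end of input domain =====

-- B replaces A's manual index-tracking scan (counter + break + slice) by a maxsplit-2 split, taking the middle piece; simpler, and measured faster (C-level split vs per-character Python loop).


-- ===== PORT A =====
-- the for-loop of A: state (i, count, idx_beg, idx_end); 'break' returns immediately
def epsLoop : List Char → Nat → Nat → Nat → Nat → Nat × Nat
  | [], _, _, b, e => (b, e)
  | c :: rest, i, count, b, e =>
    if c = '/' ∧ count = 0 then epsLoop rest (i+1) (count+1) (i+1) e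
    else if c = '/' ∧ count = 1 then (b, i)
    else epsLoop rest (i+1) count b e

def eps (file_name : String) : String :=
  let res := epsLoop file_name.toList 0 0 0 0
  String.ofList (PySem.List.slice file_name.toList (some (res.1 : Int)) (some (res.2 : Int)))

-- ===== PORT B =====
def eps_alt (file_name : String) : String :=
  let parts := (PySem.Str.splitMax? file_name "/" 2).getD []
  if parts.length = 3 then parts.getD 1 "" else ""

-- ===== PRECONDITION & SPEC =====
def Spec_eps (file_name : String) (out : String) : Prop := out = eps_alt file_name
instance (file_name : String) (out : String) : Decidable (Spec_eps file_name out) := by unfold Spec_eps; infer_instance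

-- ===== CLAIM (what is proved, stated in full; the proofs are below) =====
def Claim_equal_eps : Prop := ∀ (file_name : String), Dom_eps file_name → Spec_eps file_name (eps file_name)

-- ===== LEMMAS AND PROOFS =====

lemma go_zero (fuel : Nat) (l cur : List Char) (acc : List (List Char)) :
    PySem.Chars.splitOnMax.go ['/'] fuel 0 l cur acc = ((cur.reverse ++ l) :: acc).reverse := by
  cases fuel <;> cases l <;> simp [PySem.Chars.splitOnMax.go]

lemma go_noslash (fuel m : Nat) (l cur : List Char) (acc : List (List Char))
    (hm : m ≠ 0) (h : '/' ∉ l) :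
    PySem.Chars.splitOnMax.go ['/'] fuel m l cur acc = ((cur.reverse ++ l) :: acc).reverse := by
  induction l generalizing fuel cur with
  | nil => cases fuel <;> simp [PySem.Chars.splitOnMax.go]
  | cons c rest ih =>
    cases fuel with
    | zero => simp [PySem.Chars.splitOnMax.go]
    | succ f =>
      have hc : c ≠ '/' := by intro hc; exact h (by simp [hc])
      simp [PySem.Chars.splitOnMax.go, hm, List.isPrefixOf, Ne.symm hc]
      rw [ih f (c :: cur) (fun hr => h (by simp [hr]))]
      simp

lemma go_one (fuel : Nat) (l cur : List Char) (acc : List (List Char))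
    (hf : l.length ≤ fuel) (h : '/' ∈ l) :
    PySem.Chars.splitOnMax.go ['/'] fuel 1 l cur acc =
      (((l.dropWhile (· ≠ '/')).tail) :: (cur.reverse ++ l.takeWhile (· ≠ '/')) :: acc).reverse := by
  induction l generalizing fuel cur with
  | nil => simp at h
  | cons c rest ih =>
    cases fuel with
    | zero => simp at hf
    | succ f =>
      by_cases hc : c = '/'
      · subst hc
        simp [PySem.Chars.splitOnMax.go, List.isPrefixOf]
        rw [go_zero]
        simp [List.takeWhile, List.dropWhile]
      · have hr : '/' ∈ rest := by cases h with
          | head => exact absurd rfl hc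
          | tail _ hm => exact hm
        simp [PySem.Chars.splitOnMax.go, List.isPrefixOf, Ne.symm hc]
        rw [ih f (c :: cur) (by simpa using hf) hr]
        simp [List.takeWhile, List.dropWhile, hc]

lemma go_two (fuel : Nat) (l cur : List Char) (acc : List (List Char))
    (hf : l.length ≤ fuel) (h : '/' ∈ l) :
    PySem.Chars.splitOnMax.go ['/'] fuel 2 l cur acc =
      (if '/' ∈ (l.dropWhile (· ≠ '/')).tail then
        ((((l.dropWhile (· ≠ '/')).tail).dropWhile (· ≠ '/')).tail ::
          ((l.dropWhile (· ≠ '/')).tail).takeWhile (· ≠ '/') ::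
          (cur.reverse ++ l.takeWhile (· ≠ '/')) :: acc).reverse
      else
        (((l.dropWhile (· ≠ '/')).tail) :: (cur.reverse ++ l.takeWhile (· ≠ '/')) :: acc).reverse) := by
  induction l generalizing fuel cur with
  | nil => simp at h
  | cons c rest ih =>
    cases fuel with
    | zero => simp at hf
    | succ f =>
      by_cases hc : c = '/'
      · subst hc
        simp only [PySem.Chars.splitOnMax.go]
        simp [List.isPrefixOf, List.takeWhile, List.dropWhile]
        by_cases h2 : '/' ∈ rest
        · rw [go_one f rest [] _ (by simpa using hf) h2]; simp [h2]
        · rw [go_noslash f 1 rest [] _ (by omega) h2]; simp [h2]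
      · have hr : '/' ∈ rest := by cases h with
          | head => exact absurd rfl hc
          | tail _ hm => exact hm
        simp [PySem.Chars.splitOnMax.go, List.isPrefixOf, Ne.symm hc]
        rw [ih f (c :: cur) (by simpa using hf) hr]
        simp [List.takeWhile, List.dropWhile, hc]

-- A's loop in phase count = 1 (second-slash hunt), idx_end still 0
lemma loop_one (l : List Char) (i b : Nat) :
    epsLoop l i 1 b 0 = (b, if '/' ∈ l then i + (l.takeWhile (· ≠ '/')).length else 0) := by
  induction l generalizing i with
  | nil => simp [epsLoop]
  | cons c rest ih =>
    by_cases hc : c = '/'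
    · subst hc; simp [epsLoop, List.takeWhile]
    · rw [show epsLoop (c :: rest) i 1 b 0 = epsLoop rest (i + 1) 1 b 0 from by simp [epsLoop, hc],
        ih (i + 1), List.takeWhile_cons_of_pos (by simp [hc])]
      by_cases h2 : '/' ∈ rest
      · rw [if_pos h2, if_pos (List.mem_cons_of_mem c h2)]
        rw [show i + 1 + (rest.takeWhile (· ≠ '/')).length
              = i + (c :: rest.takeWhile (· ≠ '/')).length from by
            simp only [List.length_cons]; omega]
      · rw [if_neg h2, if_neg (by
          intro hm
          rcases List.mem_cons.mp hm with h | h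
          exacts [hc h.symm, h2 h])]

-- A's loop in phase count = 0 (first-slash hunt)
lemma loop_zero (l : List Char) (i : Nat) :
    epsLoop l i 0 0 0 =
      if '/' ∈ l then
        epsLoop ((l.dropWhile (· ≠ '/')).tail) (i + (l.takeWhile (· ≠ '/')).length + 1) 1
          (i + (l.takeWhile (· ≠ '/')).length + 1) 0
      else (0, 0) := by
  induction l generalizing i with
  | nil => simp [epsLoop]
  | cons c rest ih =>
    by_cases hc : c = '/'
    · subst hc; simp [epsLoop, List.takeWhile, List.dropWhile]
    · rw [show epsLoop (c :: rest) i 0 0 0 = epsLoop rest (i + 1) 0 0 0 from by simp [epsLoop, hc],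
        ih (i + 1),
        List.takeWhile_cons_of_pos (by simp [hc]),
        List.dropWhile_cons_of_pos (by simp [hc])]
      by_cases h2 : '/' ∈ rest
      · rw [if_pos h2, if_pos (List.mem_cons_of_mem c h2)]
        rw [show i + 1 + (rest.takeWhile (· ≠ '/')).length + 1
              = i + (c :: rest.takeWhile (· ≠ '/')).length + 1 from by
            simp only [List.length_cons]; omega]
      · rw [if_neg h2, if_neg (by
          intro hm
          rcases List.mem_cons.mp hm with h | h
          exacts [hc h.symm, h2 h])]

lemma dropWhile_eq_drop_tw (l : List Char) (p : Char → Bool) :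
    l.dropWhile p = l.drop (l.takeWhile p).length := by
  induction l with
  | nil => simp
  | cons c rest ih => by_cases hc : p c <;> simp [List.dropWhile_cons, hc, ih]

lemma drop_after (l : List Char) :
    l.drop ((l.takeWhile (· ≠ '/')).length + 1) = (l.dropWhile (· ≠ '/')).tail := by
  rw [← List.drop_drop, ← dropWhile_eq_drop_tw, List.drop_one]

lemma take_takeWhile_len (l : List Char) :
    l.take ((l.takeWhile (· ≠ '/')).length) = l.takeWhile (· ≠ '/') := by
  have := List.takeWhile_prefix (l := l) (p := (· ≠ '/'))
  exact (List.prefix_iff_eq_take.mp this).symm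

-- ===== VERDICT (by name: the statement is the Claim_ definition above) =====
theorem eps_spec : Claim_equal_eps := by
  intro s _
  unfold Spec_eps eps eps_alt
  simp only [PySem.Str.splitMax?, PySem.Chars.splitMax?, PySem.Chars.splitOnMax]
  set cs := s.toList with hcs
  rw [show ("/" : String).toList = ['/'] from rfl]
  simp only [List.isEmpty_cons, Bool.false_eq_true, if_false]
  rw [if_neg (by norm_num : ¬ ((2:Int) < 0))]
  simp only [Option.map_some, Option.getD_some]
  rw [show Int.toNat 2 = 2 from rfl]
  by_cases h1 : '/' ∈ cs
  · by_cases h2 : '/' ∈ (cs.dropWhile (· ≠ '/')).tail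
    · -- two or more slashes
      rw [loop_zero cs 0, if_pos h1, loop_one, if_pos h2,
        go_two (cs.length + 1) cs [] [] (by omega) h1, if_pos h2]
      dsimp only
      rw [PySem.List.slice_natCast,
        show 0 + (cs.takeWhile (· ≠ '/')).length + 1
              + (((cs.dropWhile (· ≠ '/')).tail).takeWhile (· ≠ '/')).length
              - (0 + (cs.takeWhile (· ≠ '/')).length + 1)
            = (((cs.dropWhile (· ≠ '/')).tail).takeWhile (· ≠ '/')).length from by omega,
        show 0 + (cs.takeWhile (· ≠ '/')).length + 1
            = (cs.takeWhile (· ≠ '/')).length + 1 from by omega,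
        drop_after cs, take_takeWhile_len]
      simp
    · -- exactly one slash
      rw [loop_zero cs 0, if_pos h1, loop_one, if_neg h2,
        go_two (cs.length + 1) cs [] [] (by omega) h1, if_neg h2]
      dsimp only
      rw [PySem.List.slice_natCast]
      simp
  · -- no slash
    rw [loop_zero cs 0, if_neg h1,
      go_noslash (cs.length + 1) 2 cs [] [] (by omega) h1]
    dsimp only
    rw [PySem.List.slice_natCast]
    simp
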